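-- pv_equiv track=rewrite | github.com/adityakak/ai | Genetic/TetrisPart2.py | removeRows
-- ===== SOURCE A (Python) =====
-- def removeRows(board):
--     boardBreakdown = [board[i:i + 10] for i in range(0, len(board), 10)]
--     toRemove = []
--     for rowNum, rows in enumerate(boardBreakdown):
--         toSet = set(rows)
--         if len(toSet) == 1 and '#' in toSet:
--             toRemove.append(rowNum)
--     # toAdd = len(toRemove)
--     boardBreakdown = [i for j, i in enumerate(boardBreakdown) if j not in toRemove]
--     board = ''.join(boardBreakdown)
--     for i in range(len(toRemove)):
--         board = '          ' + board
--     return board, len(toRemove)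
-- ===== SOURCE B (Python) =====
-- def removeRows(board):
--     kept = []
--     row = []
--     full = True
--     removed = 0
--     for ch in board:
--         row.append(ch)
--         full = full and ch == '#'
--         if len(row) == 10:
--             if full:
--                 removed += 1
--             else:
--                 kept.extend(row)
--             row = []
--             full = True
--     if row and full:
--         removed += 1
--     elif row:
--         kept.extend(row)
--     return ' ' * (10 * removed) + ''.join(kept), removed
-- ===== Notes on version B (the rewrite author's own statement) =====
-- stated objective: alternative
-- what changed: Streams the board character by character with a running row buffer and an all-hash flag, deciding each row at its 10th character, instead of materialising a list of 10-char slices, building per-row sets, collecting removal indices and re-filtering the slice list by scanning that index list.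
import Mathlib
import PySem

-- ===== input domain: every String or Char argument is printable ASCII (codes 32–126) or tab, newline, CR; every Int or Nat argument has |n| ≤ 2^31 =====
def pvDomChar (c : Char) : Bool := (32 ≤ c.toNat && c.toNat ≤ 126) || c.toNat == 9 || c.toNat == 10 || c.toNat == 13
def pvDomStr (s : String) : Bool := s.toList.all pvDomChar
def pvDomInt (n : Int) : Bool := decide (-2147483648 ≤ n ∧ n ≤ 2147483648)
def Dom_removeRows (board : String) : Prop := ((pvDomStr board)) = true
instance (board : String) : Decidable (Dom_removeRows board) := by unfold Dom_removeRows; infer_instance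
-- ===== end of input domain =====

-- B streams the board character by character with a row buffer and an all-'#' flag,
-- deciding each row at its 10th character — no slice list, no index bookkeeping (alternative single pass).

-- ===== PORT A =====
def removeRows (board : String) : String × Int :=
  let l := board.toList
  let bb : List (List Char) :=
    (PySem.List.pyRange 0 (PySem.Str.len board) 10).map
      (fun i => PySem.List.slice l (some i) (some (i + 10)))
  let toRemove : List Int :=
    (PySem.List.enumerate bb).foldl
      (fun acc p =>
        let toSet := PySem.Set.ofList p.2
        if PySem.Set.len toSet == 1 && PySem.Set.contains toSet '#' then acc ++ [p.1] else acc) []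
  let bb2 : List (List Char) :=
    (PySem.List.enumerate bb).foldl
      (fun acc p => if !(toRemove.contains p.1) then acc ++ [p.2] else acc) []
  let joined := bb2.flatten
  let final := (PySem.List.pyRange 0 ((toRemove.length : Int)) 1).foldl
      (fun acc _ => "          ".toList ++ acc) joined
  (String.ofList final, (toRemove.length : Int))

-- ===== PORT B =====
-- state: (kept, (row, (full, removed)))
def pvStepB (st : List Char × List Char × Bool × Int) (ch : Char) :
    List Char × List Char × Bool × Int :=
  let row := st.2.1 ++ [ch]
  let full := st.2.2.1 && (ch == '#')
  if row.length == 10 then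
    if full then (st.1, ([], (true, st.2.2.2 + 1)))
    else (st.1 ++ row, ([], (true, st.2.2.2)))
  else (st.1, (row, (full, st.2.2.2)))

-- the trailing 'if row and full: … elif row: …' of B
def pvFinB (st : List Char × List Char × Bool × Int) : List Char × Int :=
  if !st.2.1.isEmpty && st.2.2.1 then (st.1, st.2.2.2 + 1)
  else if !st.2.1.isEmpty then (st.1 ++ st.2.1, st.2.2.2)
  else (st.1, st.2.2.2)

def removeRows_alt (board : String) : String × Int :=
  let fin := pvFinB (board.toList.foldl pvStepB ([], ([], (true, 0))))
  (String.ofList (List.replicate (10 * fin.2.toNat) ' ' ++ fin.1), fin.2)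

-- ===== PRECONDITION & SPEC =====
def Spec_removeRows (board : String) (out : String × Int) : Prop := out = removeRows_alt board
instance (board : String) (out : String × Int) : Decidable (Spec_removeRows board out) := by unfold Spec_removeRows; infer_instance

-- ===== CLAIM (what is proved, stated in full; the proofs are below) =====
def Claim_equal_removeRows : Prop := ∀ (board : String), Dom_removeRows board → Spec_removeRows board (removeRows board)

-- ===== LEMMAS AND PROOFS =====

-- the row list both programs conceptually work over: 10-char chunks
def pvChunks : List Char → List (List Char)
  | [] => []
  | c :: t => ((c :: t).take 10) :: pvChunks ((c :: t).drop 10)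
  termination_by l => l.length
  decreasing_by simp only [List.length_drop, List.length_cons]; omega

lemma pvChunks_nil : pvChunks [] = [] := by rw [pvChunks]

lemma pvChunks_cons (c : Char) (t : List Char) :
    pvChunks (c :: t) = ((c :: t).take 10) :: pvChunks ((c :: t).drop 10) := by rw [pvChunks]

-- A's full-row test (len(set(row)) == 1 and '#' in set(row))
def pvCondA (row : List Char) : Bool :=
  PySem.Set.len (PySem.Set.ofList row) == 1 && PySem.Set.contains (PySem.Set.ofList row) '#'

-- the same test as 'nonempty and all-#'
def pvCondB (row : List Char) : Bool :=
  row.all (· == '#') && !row.isEmpty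

lemma pvCondA_eq_pvCondB (row : List Char) : pvCondA row = pvCondB row := by
  rw [Bool.eq_iff_iff]
  unfold pvCondA pvCondB
  rw [← PySem.List.dedup_eq_ofList]
  simp only [Bool.and_eq_true, beq_iff_eq, PySem.Set.len, PySem.Set.contains,
    List.contains_iff_mem, PySem.List.mem_dedup, Bool.not_eq_eq_eq_not, Bool.not_true,
    List.isEmpty_eq_false_iff, List.all_eq_true]
  constructor
  · rintro ⟨hlen, hmem⟩
    have h1 : (PySem.List.dedup row).length = 1 := by exact_mod_cast hlen
    obtain ⟨x, hx⟩ := List.length_eq_one_iff.mp h1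
    have hxs : x = '#' := by
      have h2 := (PySem.List.mem_dedup row '#').mpr hmem
      rw [hx] at h2; exact (List.mem_singleton.mp h2).symm
    refine ⟨?_, ?_⟩
    · intro c hc
      have : c ∈ PySem.List.dedup row := (PySem.List.mem_dedup row c).mpr hc
      rw [hx] at this; simp only [List.mem_singleton] at this
      simp [this, hxs]
    · intro h; subst h; simp [PySem.List.dedup, PySem.Set.ofList] at hx
  · rintro ⟨hall, hne⟩
    have hall' : ∀ c ∈ row, c = '#' := fun c hc => by simpa using hall c hc
    have hnd := PySem.List.nodup_dedup row
    have hmemr : '#' ∈ row := by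
      obtain ⟨c, hc⟩ := List.exists_mem_of_ne_nil row hne
      have := hall' c hc; rwa [this] at hc
    have hmem : '#' ∈ PySem.List.dedup row := (PySem.List.mem_dedup row '#').mpr hmemr
    have hsub : ∀ y ∈ PySem.List.dedup row, y = '#' := fun y hy =>
      hall' y ((PySem.List.mem_dedup row y).mp hy)
    have hD : PySem.List.dedup row = ['#'] := by
      match hd : PySem.List.dedup row with
      | [] => rw [hd] at hmem; simp at hmem
      | [x] => rw [hd] at hsub; rw [hsub x (by simp)]
      | x :: y :: t =>
        rw [hd] at hnd hsub
        have hx := hsub x (by simp); have hy := hsub y (by simp)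
        subst hx; subst hy; simp at hnd
    exact ⟨by rw [hD]; rfl, hmemr⟩

-- filter-by-index over enumerate = filter-by-predicate, when the index list encodes the predicate
lemma pv_enum_filter {α : Type} (cond : α → Bool) (tr : List Int) :
  ∀ (xs : List α) (s : Int),
    (∀ k (h : k < xs.length), tr.contains (s + (k : Int)) = cond xs[k]) →
    ((PySem.List.enumerate xs s).filter (fun p => !tr.contains p.1)).map (fun p => p.2)
      = xs.filter (fun r => !cond r) := by
  intro xs
  induction xs with
  | nil => intro s h; simp [PySem.List.enumerate_nil]
  | cons x t ih =>
    intro s h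
    rw [PySem.List.enumerate_cons, List.filter_cons]
    have h0 : tr.contains s = cond x := by
      have := h 0 (by simp); simpa using this
    have ht : ∀ k (hk : k < t.length), tr.contains ((s+1) + (k : Int)) = cond t[k] := by
      intro k hk
      have := h (k+1) (by simpa using hk)
      simpa [add_comm, add_assoc, add_left_comm] using this
    by_cases hc : cond x = true
    · simp only [h0, hc, Bool.not_true, List.filter_cons]
      simpa using ih (s+1) ht
    · have hc' : cond x = false := by simpa using hc
      simp only [h0, hc', Bool.not_false, List.filter_cons, if_true, List.map_cons]
      rw [ih (s+1) ht]

lemma pv_prepend_loop (L : List Int) (acc : List Char) :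
    L.foldl (fun acc _ => "          ".toList ++ acc) acc
      = List.replicate (10 * L.length) ' ' ++ acc := by
  induction L generalizing acc with
  | nil => simp
  | cons a t ih =>
    rw [List.foldl_cons, ih]
    have hsp : "          ".toList = List.replicate 10 ' ' := by decide
    rw [hsp, List.length_cons, ← List.append_assoc, ← List.replicate_add]
    ring_nf

-- A's pipeline over the row list, reduced to a direct filter and count
lemma pvA_eq (bb : List (List Char)) (tr : List Int)
    (htr : tr = (PySem.List.enumerate bb).foldl
      (fun acc p =>
        let toSet := PySem.Set.ofList p.2
        if PySem.Set.len toSet == 1 && PySem.Set.contains toSet '#' then acc ++ [p.1] else acc) []) :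
    (String.ofList
       ((PySem.List.pyRange 0 ((tr.length : Int)) 1).foldl
          (fun acc _ => "          ".toList ++ acc)
          (((PySem.List.enumerate bb).foldl
              (fun acc p => if !(tr.contains p.1) then acc ++ [p.2] else acc) []).flatten)),
     (tr.length : Int))
    = (String.ofList (List.replicate (10 * bb.countP pvCondB) ' '
          ++ (bb.filter (fun r => !pvCondB r)).flatten),
       (bb.countP pvCondB : Int)) := by
  have htr' : tr = ((PySem.List.enumerate bb).filter (fun p => pvCondA p.2)).map (fun p => p.1) := by
    rw [htr]
    have := PySem.List.foldl_append_if (p := fun p : Int × List Char => pvCondA p.2)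
      (f := fun p : Int × List Char => p.1) (PySem.List.enumerate bb) []
    simpa [pvCondA] using this
  have hcont : ∀ k (hk : k < bb.length), tr.contains ((0 : Int) + (k : Int)) = pvCondA bb[k] := by
    intro k hk
    rw [Bool.eq_iff_iff, List.contains_iff_mem]
    simp only [htr', List.mem_map, List.mem_filter, PySem.List.mem_enumerate_iff]
    constructor
    · rintro ⟨p, ⟨⟨m, hm, rfl⟩, hp⟩, hfst⟩
      simp only at hfst hp
      have : m = k := by omega
      subst this; exact hp
    · intro h
      exact ⟨((0 : Int) + (k : Int), bb[k]), ⟨⟨k, hk, rfl⟩, h⟩, rfl⟩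
  have hA2 : (PySem.List.enumerate bb).foldl
      (fun acc p => if !(tr.contains p.1) then acc ++ [p.2] else acc) ([] : List (List Char))
      = bb.filter (fun r => !pvCondA r) := by
    have h1 := PySem.List.foldl_append_if (p := fun p : Int × List Char => !tr.contains p.1)
      (f := fun p : Int × List Char => p.2) (PySem.List.enumerate bb) []
    rw [h1]
    simpa using pv_enum_filter pvCondA tr bb 0 hcont
  have hAcount : tr.length = bb.countP pvCondA := by
    rw [htr', List.length_map, ← List.countP_eq_length_filter]
    have h2 : bb.countP pvCondA
        = List.countP pvCondA ((PySem.List.enumerate bb 0).map (fun x => x.2)) := by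
      rw [PySem.List.map_snd_enumerate]
    rw [h2, List.countP_map]
    rfl
  have hcond : pvCondA = pvCondB := funext pvCondA_eq_pvCondB
  rw [hA2, pv_prepend_loop, hAcount, hcond]
  rw [PySem.List.length_pyRange_one]
  simp

-- step-10 range of a nonpositive bound is empty
lemma pvRange_ten_nil (x : Int) (hx : x ≤ 0) : PySem.List.pyRange 0 x 10 = [] := by
  rw [PySem.List.pyRange_of_pos 0 x (by omega)]
  simp [show ¬ (0 : Int) < x by omega]

-- A's slice comprehension is exactly the chunk list
lemma pvChunksA : ∀ (n : Nat) (l : List Char), l.length ≤ n →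
    (PySem.List.pyRange 0 ((l.length : Int)) 10).map
      (fun i => PySem.List.slice l (some i) (some (i + 10))) = pvChunks l := by
  intro n
  induction n with
  | zero =>
    intro l hl
    have : l = [] := List.length_eq_zero_iff.mp (by omega)
    subst this
    rw [pvChunks_nil]
    simp [pvRange_ten_nil 0 (by omega)]
  | succ n ih =>
    intro l hl
    rcases l with _ | ⟨c, t⟩
    · rw [pvChunks_nil]
      simp [pvRange_ten_nil 0 (by omega)]
    · set l := c :: t with hldef
      have hlen : 0 < l.length := by simp [hldef]
      -- unfold one chunk from the range
      have hcons : PySem.List.pyRange 0 ((l.length : Int)) 10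
          = 0 :: (PySem.List.pyRange 0 (((l.drop 10).length : Int)) 10).map (fun i => i + 10) := by
        rw [PySem.List.pyRange_of_pos 0 ((l.length : Int)) (by omega),
            PySem.List.pyRange_of_pos 0 (((l.drop 10).length : Int)) (by omega)]
        have hdl : (l.drop 10).length = l.length - 10 := by simp
        by_cases h10 : 10 < l.length
        · have hif1 : ((0 : Int) < (l.length : Int)) := by exact_mod_cast hlen
          have hif2 : ((0 : Int) < ((l.drop 10).length : Int)) := by
            rw [hdl]; exact_mod_cast Nat.sub_pos_of_lt h10
          rw [if_pos hif1, if_pos hif2]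
          have hm : (((l.length : Int) - 0 + 10 - 1) / 10).toNat
              = ((((l.drop 10).length : Int) - 0 + 10 - 1) / 10).toNat + 1 := by
            rw [hdl]; push_cast [Nat.le_of_lt h10]; omega
          rw [hm, List.range_succ_eq_map]
          simp only [List.map_cons, List.map_map, List.cons.injEq]
          refine ⟨by norm_num, ?_⟩
          apply List.map_congr_left; intro k _; simp [Function.comp]; ring
        · have hle : l.length ≤ 10 := by omega
          have hif1 : ((0 : Int) < (l.length : Int)) := by exact_mod_cast hlen
          have hif2 : ¬ ((0 : Int) < ((l.drop 10).length : Int)) := by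
            rw [hdl]; simp; omega
          rw [if_pos hif1, if_neg hif2]
          have hm : (((l.length : Int) - 0 + 10 - 1) / 10).toNat = 1 := by
            omega
          rw [hm]
          simp [List.range_succ]
      rw [hcons]
      simp only [List.map_cons, List.map_map]
      have h0 : PySem.List.slice l (some 0) (some (0 + 10)) = l.take 10 := by
        norm_num
        rw [PySem.List.slice_to l (by omega)]
        rfl
      have hshift : ((PySem.List.pyRange 0 (((l.drop 10).length : Int)) 10).map
            ((fun i => PySem.List.slice l (some i) (some (i + 10))) ∘ (fun i => i + 10)))
          = (PySem.List.pyRange 0 (((l.drop 10).length : Int)) 10).map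
            (fun i => PySem.List.slice (l.drop 10) (some i) (some (i + 10))) := by
        apply List.map_congr_left
        intro i hi
        have hi0 : 0 ≤ i := ((PySem.List.mem_pyRange_iff_of_pos (by omega) i).mp hi).1
        simp only [Function.comp]
        rw [PySem.List.slice_toNat l (by omega) (by omega),
            PySem.List.slice_toNat (l.drop 10) (by omega) (by omega)]
        have e1 : (i + 10 + 10).toNat - (i + 10).toNat = 10 := by omega
        have e2 : (i + 10).toNat - i.toNat = 10 := by omega
        have e3 : (i + 10).toNat = 10 + i.toNat := by omega
        rw [e1, e2, e3, ← List.drop_drop]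
      rw [hshift, ih (l.drop 10) (by simp; omega), h0]
      conv_rhs => rw [hldef, pvChunks_cons]
  
-- B's in-row accumulation: fewer than 10 chars never trigger the row boundary
lemma pvB_accum : ∀ (r : List Char) (kept row : List Char) (full : Bool) (rem : Int),
    row.length + r.length < 10 →
    r.foldl pvStepB (kept, (row, (full, rem)))
      = (kept, (row ++ r, (full && r.all (· == '#'), rem))) := by
  intro r
  induction r with
  | nil => intro kept row full rem h; simp
  | cons c r' ih =>
    intro kept row full rem h
    simp only [List.foldl_cons]
    have hne : ((row ++ [c]).length == 10) = false := by
      simp only [List.length_append, List.length_cons, List.length_nil, beq_eq_false_iff_ne]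
      simp at h ⊢; omega
    rw [show pvStepB (kept, (row, (full, rem))) c
        = (kept, (row ++ [c], (full && (c == '#'), rem))) by
      unfold pvStepB; simp only; rw [hne]; simp]
    rw [ih kept (row ++ [c]) (full && (c == '#')) rem (by simp at h ⊢; omega)]
    simp [Bool.and_assoc]

-- B's step across one full row boundary
lemma pvB_row : ∀ (r : List Char), r ≠ [] → ∀ (l kept row : List Char) (full : Bool) (rem : Int),
    row.length + r.length = 10 →
    (r ++ l).foldl pvStepB (kept, (row, (full, rem)))
      = l.foldl pvStepB (if full && r.all (· == '#') then (kept, ([], (true, rem + 1)))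
          else (kept ++ (row ++ r), ([], (true, rem)))) := by
  intro r
  induction r with
  | nil => intro h; exact absurd rfl h
  | cons c r' ih =>
    intro _ l kept row full rem h
    simp only [List.cons_append, List.foldl_cons]
    by_cases hr' : r' = []
    · subst hr'
      have h9 : row.length = 9 := by simp at h; omega
      have heq : ((row ++ [c]).length == 10) = true := by simp [h9]
      rw [show pvStepB (kept, (row, (full, rem))) c
          = if full && (c == '#') then (kept, ([], (true, rem + 1)))
            else (kept ++ (row ++ [c]), ([], (true, rem))) by
        unfold pvStepB; simp only; rw [heq]; simp]
      simp
    · have hne : ((row ++ [c]).length == 10) = false := by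
        have hr'pos : 0 < r'.length := List.length_pos_iff.mpr hr'
        simp only [List.length_append, List.length_cons, List.length_nil, beq_eq_false_iff_ne]
        simp at h ⊢; omega
      rw [show pvStepB (kept, (row, (full, rem))) c
          = (kept, (row ++ [c], (full && (c == '#'), rem))) by
        unfold pvStepB; simp only; rw [hne]; simp]
      rw [ih hr' l kept (row ++ [c]) (full && (c == '#')) rem (by simp at h ⊢; omega)]
      simp [Bool.and_assoc]

-- B's whole pass, characterised chunk by chunk
lemma pvB_main : ∀ (n : Nat) (l : List Char), l.length ≤ n → ∀ (kept : List Char) (rem : Int),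
    pvFinB (l.foldl pvStepB (kept, ([], (true, rem))))
      = (kept ++ ((pvChunks l).filter (fun r => !pvCondB r)).flatten,
         rem + ((pvChunks l).countP pvCondB : Int)) := by
  intro n
  induction n with
  | zero =>
    intro l hl kept rem
    have : l = [] := List.length_eq_zero_iff.mp (by omega)
    subst this
    rw [pvChunks_nil]
    simp [pvFinB]
  | succ n ih =>
    intro l hl kept rem
    rcases hnil : l with _ | ⟨c, t⟩
    · rw [pvChunks_nil]
      simp [pvFinB]
    · rw [← hnil]
      have hlen : 0 < l.length := by simp [hnil]
      by_cases h10 : 10 ≤ l.length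
      · -- one full row then recurse
        have hsplit : l = l.take 10 ++ l.drop 10 := (List.take_append_drop 10 l).symm
        have htne : l.take 10 ≠ [] := by
          have hlt10 : (l.take 10).length = 10 := by rw [List.length_take]; omega
          intro hx
          rw [hx] at hlt10
          simp at hlt10
        conv_lhs => rw [hsplit]
        rw [pvB_row (l.take 10) htne (l.drop 10) kept [] true rem (by simp [List.length_take]; omega)]
        have hchunks : pvChunks l = l.take 10 :: pvChunks (l.drop 10) := by
          rw [hnil, pvChunks_cons]
        have hcond : pvCondB (l.take 10) = (l.take 10).all (· == '#') := by
          unfold pvCondB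
          simp [List.isEmpty_eq_false_iff.mpr htne]
        by_cases hfull : (l.take 10).all (· == '#') = true
        · rw [if_pos (by simp [hfull])]
          rw [ih (l.drop 10) (by simp; omega) kept (rem + 1)]
          rw [hchunks]
          rw [List.filter_cons, List.countP_cons]
          simp only [hcond, hfull]
          simp only [Bool.not_true, Bool.false_eq_true, if_false, if_true]
          refine Prod.ext rfl ?_
          push_cast; ring
        · rw [if_neg (by simp [hfull])]
          rw [ih (l.drop 10) (by simp; omega) (kept ++ ([] ++ l.take 10)) rem]
          rw [hchunks]
          rw [List.filter_cons, List.countP_cons]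
          simp only [hcond]
          rw [Bool.not_eq_true] at hfull
          simp [hfull]
      · -- a final partial row
        rw [pvB_accum l kept [] true rem (by simp; omega)]
        have hchunks : pvChunks l = l :: pvChunks [] := by
          rw [hnil, pvChunks_cons]
          congr 1
          · exact List.take_of_length_le (by rw [← hnil]; omega)
          · rw [List.drop_of_length_le (by rw [← hnil]; omega)]
        rw [hchunks]
        have hlne : l.isEmpty = false := by rw [hnil]; rfl
        unfold pvFinB pvCondB
        simp only [List.nil_append, Bool.true_and, List.filter_cons, List.countP_cons, hlne]
        by_cases hfull : l.all (· == '#') = true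
        · simp [hfull, pvChunks_nil]
        · rw [Bool.not_eq_true] at hfull
          simp [hfull, pvChunks_nil]

-- ===== VERDICT (by name: the statement is the Claim_ definition above) =====
theorem removeRows_spec : Claim_equal_removeRows := by
  intro board _
  show removeRows board = removeRows_alt board
  have hbb : (PySem.List.pyRange 0 (PySem.Str.len board) 10).map
      (fun i => PySem.List.slice board.toList (some i) (some (i + 10))) = pvChunks board.toList := by
    have hlen : PySem.Str.len board = ((board.toList.length : Int)) := by simp
    rw [hlen]
    exact pvChunksA board.toList.length board.toList (le_refl _)
  refine (pvA_eq _ _ rfl).trans ?_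
  rw [hbb]
  simp only [removeRows_alt, pvB_main board.toList.length board.toList (le_refl _) [] 0]
  simp
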